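-- pv_equiv track=rewrite | github.com/IQcrew/learn | learn20.py | writeSeason
-- ===== SOURCE A (Python) =====
-- def writeSeason(Imont : str, Iday : int):
--     months = {
--         "Spring" : {"march" :(20,31), "april" : (1,30), "may" : (1,31), "june" : (0,20)},
--         "Summer" : {"june" :(21,30), "july" : (1,31), "august" : (1,31), "september" : (0,21)},
--         "Autumn" : {"september" :(22,30), "october" : (1,31), "november" : (1,30), "december" : (0,20)},
--         "Winter" : {"december" :(21,31), "january" : (1,31), "february" : (1,29), "march" : (0,19)},}
--     for season in months.keys():
--         for month in months[season].keys():
--             if(month == Imont and months[season][month][0]<=Iday and months[season][month][1]>=Iday):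
--                 return season
--     return "Invalid"
-- ===== SOURCE B (Python) =====
-- def writeSeason(Imont: str, Iday: int):
--     table = {
--         "march": [(20, 31, "Spring"), (0, 19, "Winter")],
--         "april": [(1, 30, "Spring")],
--         "may": [(1, 31, "Spring")],
--         "june": [(0, 20, "Spring"), (21, 30, "Summer")],
--         "july": [(1, 31, "Summer")],
--         "august": [(1, 31, "Summer")],
--         "september": [(0, 21, "Summer"), (22, 30, "Autumn")],
--         "october": [(1, 31, "Autumn")],
--         "november": [(1, 30, "Autumn")],
--         "december": [(0, 20, "Autumn"), (21, 31, "Winter")],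
--         "january": [(1, 31, "Winter")],
--         "february": [(1, 29, "Winter")],
--     }
--     for lo, hi, season in table.get(Imont, []):
--         if lo <= Iday <= hi:
--             return season
--     return "Invalid"
-- ===== Notes on version B (the rewrite author's own statement) =====
-- stated objective: idiomatic
-- what changed: Inverted the season-to-months table into a month-keyed dict of (lo, hi, season) ranges, so the nested season/month scan collapses to one dict lookup plus a scan over at most two ranges.
import Mathlib
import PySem

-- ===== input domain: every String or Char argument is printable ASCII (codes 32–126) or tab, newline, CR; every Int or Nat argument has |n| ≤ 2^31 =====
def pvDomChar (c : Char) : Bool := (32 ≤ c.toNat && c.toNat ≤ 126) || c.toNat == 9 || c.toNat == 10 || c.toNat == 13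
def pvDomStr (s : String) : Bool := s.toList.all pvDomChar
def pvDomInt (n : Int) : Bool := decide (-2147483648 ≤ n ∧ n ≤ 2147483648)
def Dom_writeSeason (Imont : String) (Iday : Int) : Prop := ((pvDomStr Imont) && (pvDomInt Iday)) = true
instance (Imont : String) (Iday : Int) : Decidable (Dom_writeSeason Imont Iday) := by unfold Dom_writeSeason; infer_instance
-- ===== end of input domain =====

-- B inverts A's season→month table into a month-keyed dict of (lo,hi,season) ranges: one lookup plus a scan of at most two ranges (idiomatic; same cost).

-- ===== PORT A =====
-- A's nested dict literal, in insertion order: seasons, each with its months and (lo,hi) bounds.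
def pvMonthsA : List (String × List (String × (Int × Int))) :=
  [("Spring", [("march", (20, 31)), ("april", (1, 30)), ("may", (1, 31)), ("june", (0, 20))]),
   ("Summer", [("june", (21, 30)), ("july", (1, 31)), ("august", (1, 31)), ("september", (0, 21))]),
   ("Autumn", [("september", (22, 30)), ("october", (1, 31)), ("november", (1, 30)), ("december", (0, 20))]),
   ("Winter", [("december", (21, 31)), ("january", (1, 31)), ("february", (1, 29)), ("march", (0, 19))])]

-- the inner 'for month in months[season].keys()' loop, returning 'some season' on a hit
def pvInnerA (Imont : String) (Iday : Int) (season : String) : List (String × (Int × Int)) → Option String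
  | [] => none
  | (month, bounds) :: rest =>
      if month = Imont ∧ bounds.1 ≤ Iday ∧ bounds.2 ≥ Iday then some season
      else pvInnerA Imont Iday season rest

-- the outer 'for season in months.keys()' loop, falling through to "Invalid"
def pvOuterA (Imont : String) (Iday : Int) : List (String × List (String × (Int × Int))) → String
  | [] => "Invalid"
  | (season, ms) :: rest =>
      match pvInnerA Imont Iday season ms with
      | some r => r
      | none => pvOuterA Imont Iday rest

def writeSeason (Imont : String) (Iday : Int) : String :=
  pvOuterA Imont Iday pvMonthsA

-- ===== PORT B =====
-- B's month-keyed table: month ↦ list of (lo, hi, season) ranges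
def pvTableB : PySem.Dict String (List (Int × Int × String)) :=
  PySem.Dict.ofList
    [("march", [(20, 31, "Spring"), (0, 19, "Winter")]),
     ("april", [(1, 30, "Spring")]),
     ("may", [(1, 31, "Spring")]),
     ("june", [(0, 20, "Spring"), (21, 30, "Summer")]),
     ("july", [(1, 31, "Summer")]),
     ("august", [(1, 31, "Summer")]),
     ("september", [(0, 21, "Summer"), (22, 30, "Autumn")]),
     ("october", [(1, 31, "Autumn")]),
     ("november", [(1, 30, "Autumn")]),
     ("december", [(0, 20, "Autumn"), (21, 31, "Winter")]),
     ("january", [(1, 31, "Winter")]),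
     ("february", [(1, 29, "Winter")])]

-- 'for lo, hi, season in …: if lo <= Iday <= hi: return season' / fall through to "Invalid"
def pvScanB (Iday : Int) : List (Int × Int × String) → String
  | [] => "Invalid"
  | (lo, hi, season) :: rest =>
      if lo ≤ Iday ∧ Iday ≤ hi then season else pvScanB Iday rest

def writeSeason_alt (Imont : String) (Iday : Int) : String :=
  pvScanB Iday (pvTableB.getD Imont [])

-- ===== PRECONDITION & SPEC =====
def Spec_writeSeason (Imont : String) (Iday : Int) (out : String) : Prop := out = writeSeason_alt Imont Iday
instance (Imont : String) (Iday : Int) (out : String) : Decidable (Spec_writeSeason Imont Iday out) := by unfold Spec_writeSeason; infer_instance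

-- ===== CLAIM (what is proved, stated in full; the proofs are below) =====
def Claim_equal_writeSeason : Prop := ∀ (Imont : String) (Iday : Int), Dom_writeSeason Imont Iday → Spec_writeSeason Imont Iday (writeSeason Imont Iday)

-- ===== LEMMAS AND PROOFS =====

-- ===== VERDICT (by name: the statement is the Claim_ definition above) =====
theorem writeSeason_spec : Claim_equal_writeSeason := by
  intro Imont Iday _
  unfold Spec_writeSeason
  by_cases h1 : Imont = "march"
  · subst h1
    have hB : pvTableB.getD "march" [] = ([(20, 31, "Spring"), (0, 19, "Winter")] : List (Int × Int × String)) := by decide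
    simp only [writeSeason, writeSeason_alt, hB, pvMonthsA, pvOuterA, pvInnerA, pvScanB,
      String.reduceEq, false_and, if_false, true_and, ge_iff_le]
    split_ifs <;> rfl
  by_cases h2 : Imont = "april"
  · subst h2
    have hB : pvTableB.getD "april" [] = ([(1, 30, "Spring")] : List (Int × Int × String)) := by decide
    simp only [writeSeason, writeSeason_alt, hB, pvMonthsA, pvOuterA, pvInnerA, pvScanB,
      String.reduceEq, false_and, if_false, true_and, ge_iff_le]
    split_ifs <;> rfl
  by_cases h3 : Imont = "may"
  · subst h3
    have hB : pvTableB.getD "may" [] = ([(1, 31, "Spring")] : List (Int × Int × String)) := by decide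
    simp only [writeSeason, writeSeason_alt, hB, pvMonthsA, pvOuterA, pvInnerA, pvScanB,
      String.reduceEq, false_and, if_false, true_and, ge_iff_le]
    split_ifs <;> rfl
  by_cases h4 : Imont = "june"
  · subst h4
    have hB : pvTableB.getD "june" [] = ([(0, 20, "Spring"), (21, 30, "Summer")] : List (Int × Int × String)) := by decide
    simp only [writeSeason, writeSeason_alt, hB, pvMonthsA, pvOuterA, pvInnerA, pvScanB,
      String.reduceEq, false_and, if_false, true_and, ge_iff_le]
    split_ifs <;> rfl
  by_cases h5 : Imont = "july"
  · subst h5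
    have hB : pvTableB.getD "july" [] = ([(1, 31, "Summer")] : List (Int × Int × String)) := by decide
    simp only [writeSeason, writeSeason_alt, hB, pvMonthsA, pvOuterA, pvInnerA, pvScanB,
      String.reduceEq, false_and, if_false, true_and, ge_iff_le]
    split_ifs <;> rfl
  by_cases h6 : Imont = "august"
  · subst h6
    have hB : pvTableB.getD "august" [] = ([(1, 31, "Summer")] : List (Int × Int × String)) := by decide
    simp only [writeSeason, writeSeason_alt, hB, pvMonthsA, pvOuterA, pvInnerA, pvScanB,
      String.reduceEq, false_and, if_false, true_and, ge_iff_le]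
    split_ifs <;> rfl
  by_cases h7 : Imont = "september"
  · subst h7
    have hB : pvTableB.getD "september" [] = ([(0, 21, "Summer"), (22, 30, "Autumn")] : List (Int × Int × String)) := by decide
    simp only [writeSeason, writeSeason_alt, hB, pvMonthsA, pvOuterA, pvInnerA, pvScanB,
      String.reduceEq, false_and, if_false, true_and, ge_iff_le]
    split_ifs <;> rfl
  by_cases h8 : Imont = "october"
  · subst h8
    have hB : pvTableB.getD "october" [] = ([(1, 31, "Autumn")] : List (Int × Int × String)) := by decide
    simp only [writeSeason, writeSeason_alt, hB, pvMonthsA, pvOuterA, pvInnerA, pvScanB,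
      String.reduceEq, false_and, if_false, true_and, ge_iff_le]
    split_ifs <;> rfl
  by_cases h9 : Imont = "november"
  · subst h9
    have hB : pvTableB.getD "november" [] = ([(1, 30, "Autumn")] : List (Int × Int × String)) := by decide
    simp only [writeSeason, writeSeason_alt, hB, pvMonthsA, pvOuterA, pvInnerA, pvScanB,
      String.reduceEq, false_and, if_false, true_and, ge_iff_le]
    split_ifs <;> rfl
  by_cases h10 : Imont = "december"
  · subst h10
    have hB : pvTableB.getD "december" [] = ([(0, 20, "Autumn"), (21, 31, "Winter")] : List (Int × Int × String)) := by decide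
    simp only [writeSeason, writeSeason_alt, hB, pvMonthsA, pvOuterA, pvInnerA, pvScanB,
      String.reduceEq, false_and, if_false, true_and, ge_iff_le]
    split_ifs <;> rfl
  by_cases h11 : Imont = "january"
  · subst h11
    have hB : pvTableB.getD "january" [] = ([(1, 31, "Winter")] : List (Int × Int × String)) := by decide
    simp only [writeSeason, writeSeason_alt, hB, pvMonthsA, pvOuterA, pvInnerA, pvScanB,
      String.reduceEq, false_and, if_false, true_and, ge_iff_le]
    split_ifs <;> rfl
  by_cases h12 : Imont = "february"
  · subst h12
    have hB : pvTableB.getD "february" [] = ([(1, 29, "Winter")] : List (Int × Int × String)) := by decide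
    simp only [writeSeason, writeSeason_alt, hB, pvMonthsA, pvOuterA, pvInnerA, pvScanB,
      String.reduceEq, false_and, if_false, true_and, ge_iff_le]
    split_ifs <;> rfl
  -- Imont is none of the twelve month names: both sides fall through to "Invalid"
  have hB0 : pvTableB.getD Imont [] = [] := by
    have hmk : pvTableB = PySem.Dict.mk
        [("march", [(20, 31, "Spring"), (0, 19, "Winter")]), ("april", [(1, 30, "Spring")]), ("may", [(1, 31, "Spring")]), ("june", [(0, 20, "Spring"), (21, 30, "Summer")]), ("july", [(1, 31, "Summer")]), ("august", [(1, 31, "Summer")]), ("september", [(0, 21, "Summer"), (22, 30, "Autumn")]), ("october", [(1, 31, "Autumn")]), ("november", [(1, 30, "Autumn")]), ("december", [(0, 20, "Autumn"), (21, 31, "Winter")]), ("january", [(1, 31, "Winter")]), ("february", [(1, 29, "Winter")])] := by decide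
    rw [hmk, PySem.Dict.getD_eq_get?_getD]
    simp [PySem.Dict.get?, Ne.symm h1, Ne.symm h2, Ne.symm h3, Ne.symm h4, Ne.symm h5, Ne.symm h6, Ne.symm h7, Ne.symm h8, Ne.symm h9, Ne.symm h10, Ne.symm h11, Ne.symm h12]
  simp [writeSeason_alt, hB0, pvScanB, writeSeason, pvMonthsA, pvOuterA, pvInnerA,
    Ne.symm h1, Ne.symm h2, Ne.symm h3, Ne.symm h4, Ne.symm h5, Ne.symm h6, Ne.symm h7,
    Ne.symm h8, Ne.symm h9, Ne.symm h10, Ne.symm h11, Ne.symm h12]
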